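-- pv_equiv track=rewrite | github.com/tsenglying-SH/Code_Exercise | 剑指Offer/数字序列中某一位的数字/数字序列中某一位的数字_Python3.py | digitAtIndex
-- ===== SOURCE A (Python) =====
-- def digitAtIndex(n):
--     """
--     :type n: int
--     :rtype: int
--     """
--     if n < 0: return -1
--     if n == 0: return 0
--
--     bit_num, bit_cnt, base = 1, 9, 1
--     while n > bit_num * bit_cnt:
--         n -= bit_num * bit_cnt
--         bit_num += 1
--         bit_cnt *= 10
--         base *= 10
--
--     order = (n - 1) // bit_num
--     bit = (n - 1) % bit_num
--     num = order + base
--     return num // 10 ** (bit_num - 1 - bit) % 10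
-- ===== SOURCE B (Python) =====
-- def digitAtIndex(n):
--     """
--     :type n: int
--     :rtype: int
--     """
--     if n < 0: return -1
--     if n == 0: return 0
--     # binary search for the number whose decimal digits contain position n
--     lo, hi = 1, n
--     while lo < hi:
--         mid = (lo + hi) // 2
--         if _seq_len(mid) > n:
--             hi = mid
--         else:
--             lo = mid + 1
--     before = _seq_len(lo - 1)      # digits of the sequence before lo
--     d = _seq_len(lo) - before      # number of digits of lo
--     return lo // 10 ** (d - 1 - (n - before)) % 10
--
-- def _seq_len(m):
--     # total number of digits in "0" + "1" + ... + str(m)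
--     t, p = 1, 1
--     while p <= m:
--         t += m - p + 1
--         p *= 10
--     return t
-- ===== Notes on version B (the rewrite author's own statement) =====
-- stated objective: alternative
-- what changed: Replaced A's order-of-magnitude arithmetic (skip whole digit-length blocks of the sequence by subtraction, then divmod to locate the containing number) by a binary search over the monotone total-digit-count function L(m) = length of the concatenation of the decimal representations from zero through m, then reading the digit off the found number.
import Mathlib
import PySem

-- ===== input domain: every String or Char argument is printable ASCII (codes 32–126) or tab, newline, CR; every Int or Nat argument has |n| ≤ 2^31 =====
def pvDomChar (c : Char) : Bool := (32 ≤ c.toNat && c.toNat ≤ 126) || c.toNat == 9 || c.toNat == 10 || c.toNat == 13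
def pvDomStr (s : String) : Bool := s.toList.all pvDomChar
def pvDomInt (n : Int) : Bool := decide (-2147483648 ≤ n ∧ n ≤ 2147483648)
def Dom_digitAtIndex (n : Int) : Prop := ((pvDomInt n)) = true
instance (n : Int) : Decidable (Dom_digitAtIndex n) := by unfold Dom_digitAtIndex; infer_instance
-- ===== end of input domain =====

-- B replaces A's order-of-magnitude block-skipping arithmetic by a binary search on the
-- (monotone) total-digit-count function of the sequence "0","1","2",…; alternative algorithm.

-- ===== PORT A =====
-- A's while loop; fuel n.toNat suffices: each iteration subtracts bit_num*bit_cnt ≥ 9 from n,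
-- so the fuel-0 branch is unreachable on every admitted call; the exponent bit_num-1-bit is
-- nonnegative at the return, so '.toNat' is exact there.
def pvLoopA : Nat → Int → Int → Int → Int → Int
  | 0, _, _, _, _ => 0
  | fuel+1, n, bitNum, bitCnt, base =>
    if n > bitNum * bitCnt then
      pvLoopA fuel (n - bitNum * bitCnt) (bitNum + 1) (bitCnt * 10) (base * 10)
    else
      let order := PySem.Int.floordiv (n - 1) bitNum
      let bit := PySem.Int.mod (n - 1) bitNum
      let num := order + base
      PySem.Int.mod (PySem.Int.floordiv num (10 ^ (bitNum - 1 - bit).toNat)) 10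

def digitAtIndex (n : Int) : Int :=
  if n < 0 then -1
  else if n = 0 then 0
  else pvLoopA n.toNat n 1 9 1

-- ===== PORT B =====
-- helper _seq_len of Source B: t=1, p=1; while p <= m: t += m - p + 1; p *= 10.
-- fuel m.toNat+1 suffices: the loop runs once per power of ten ≤ m, and 10^k > k,
-- so the fuel-0 branch (returning t) is unreachable.
def pvSeqLenAux : Nat → Int → Int → Int → Int
  | 0, t, _, _ => t
  | fuel+1, t, p, m => if p ≤ m then pvSeqLenAux fuel (t + m - p + 1) (p * 10) m else t

def pvSeqLen (m : Int) : Int := pvSeqLenAux (m.toNat + 1) 1 1 m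

-- Source B's binary-search while loop; fuel n.toNat suffices: hi - lo shrinks by at least 1
-- per iteration and starts at n - 1 (mid is computed once in Source B; it is inlined here).
def pvSearch : Nat → Int → Int → Int → Int
  | 0, _, lo, _ => lo
  | fuel+1, n, lo, hi =>
    if lo < hi then
      if pvSeqLen (PySem.Int.floordiv (lo + hi) 2) > n then
        pvSearch fuel n lo (PySem.Int.floordiv (lo + hi) 2)
      else
        pvSearch fuel n (PySem.Int.floordiv (lo + hi) 2 + 1) hi
    else lo

def digitAtIndex_alt (n : Int) : Int :=
  if n < 0 then -1
  else if n = 0 then 0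
  else
    let lo := pvSearch n.toNat n 1 n
    let before := pvSeqLen (lo - 1)
    let d := pvSeqLen lo - before
    -- exponent d - 1 - (n - before) is nonnegative at the return, so '.toNat' is exact
    PySem.Int.mod (PySem.Int.floordiv lo (10 ^ (d - 1 - (n - before)).toNat)) 10

-- ===== PRECONDITION & SPEC =====
def Spec_digitAtIndex (n : Int) (out : Int) : Prop := out = digitAtIndex_alt n
instance (n : Int) (out : Int) : Decidable (Spec_digitAtIndex n out) := by unfold Spec_digitAtIndex; infer_instance

-- ===== CLAIM (what is proved, stated in full; the proofs are below) =====
def Claim_equal_digitAtIndex : Prop := ∀ (n : Int), Dom_digitAtIndex n → Spec_digitAtIndex n (digitAtIndex n)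

-- ===== LEMMAS AND PROOFS =====

-- proof-side sum: pvS j c m = Σ_{k=j}^{j+c-1} (if 10^k ≤ m then m - 10^k + 1 else 0)
def pvS : Nat → Nat → Int → Int
  | _, 0, _ => 0
  | j, c+1, m => (if (10:Int)^j ≤ m then m - (10:Int)^j + 1 else 0) + pvS (j+1) c m

theorem pvS_zero : ∀ (c j : Nat) (m : Int), m < (10:Int)^j → pvS j c m = 0 := by
  intro c
  induction c with
  | zero => intro j m _; simp [pvS]
  | succ c ih =>
    intro j m hm
    have h1 : ¬ ((10:Int)^j ≤ m) := not_le.mpr hm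
    have h2 : m < (10:Int)^(j+1) :=
      lt_of_lt_of_le hm (pow_le_pow_right₀ (by norm_num) (by omega))
    simp [pvS, h1, ih (j+1) m h2]

theorem pvS_stable : ∀ (c c' j : Nat) (m : Int), c ≤ c' → m < (10:Int)^(j+c) →
    pvS j c' m = pvS j c m := by
  intro c
  induction c with
  | zero =>
    intro c' j m _ hm
    simp only [Nat.add_zero] at hm
    rw [pvS_zero c' j m hm]; simp [pvS]
  | succ c ih =>
    intro c' j m hc hm
    obtain ⟨c'', rfl⟩ : ∃ c'', c' = c'' + 1 := ⟨c' - 1, by omega⟩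
    simp only [pvS]
    rw [ih c'' (j+1) m (by omega) (by rw [show j+1+c = j+(c+1) from by omega]; exact hm)]

theorem seqAux_closed : ∀ (c fuel j : Nat) (t m : Int), m < (10:Int)^(j+c) → c ≤ fuel →
    pvSeqLenAux fuel t ((10:Int)^j) m = t + pvS j c m := by
  intro c
  induction c with
  | zero =>
    intro fuel j t m hm _
    have hnot : ¬ ((10:Int)^j ≤ m) := not_le.mpr (by simpa using hm)
    cases fuel with
    | zero => simp [pvSeqLenAux, pvS]
    | succ f => simp [pvSeqLenAux, pvS, hnot]
  | succ c ih =>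
    intro fuel j t m hm hc
    obtain ⟨f, rfl⟩ : ∃ f, fuel = f + 1 := ⟨fuel - 1, by omega⟩
    by_cases hp : (10:Int)^j ≤ m
    · simp only [pvSeqLenAux, if_pos hp]
      have h10 : (10:Int)^j * 10 = (10:Int)^(j+1) := (pow_succ 10 j).symm
      rw [h10, ih f (j+1) (t + m - (10:Int)^j + 1) m
        (by rw [show j+1+c = j+(c+1) from by omega]; exact hm) (by omega)]
      simp [pvS, hp]; ring
    · have h2 : m < (10:Int)^(j+1) :=
        lt_of_lt_of_le (not_le.mp hp) (pow_le_pow_right₀ (by norm_num) (by omega))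
      simp [pvSeqLenAux, pvS, hp, pvS_zero c (j+1) m h2]

theorem lt_pow_toNat (m : Int) (h0 : 0 ≤ m) : m < (10:Int)^(m.toNat + 1) := by
  have h1 : m.toNat < 10 ^ m.toNat := Nat.lt_pow_self (by norm_num)
  have h2 : ((m.toNat : Int)) < (10:Int)^(m.toNat) := by exact_mod_cast h1
  have h3 : (10:Int)^(m.toNat) ≤ (10:Int)^(m.toNat+1) :=
    pow_le_pow_right₀ (by norm_num) (by omega)
  have h4 : m = (m.toNat : Int) := (Int.toNat_of_nonneg h0).symm
  omega

theorem seqLen_closed (c : Nat) (m : Int) (h0 : 0 ≤ m) (hm : m < (10:Int)^c) :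
    pvSeqLen m = 1 + pvS 0 c m := by
  have hbig : m < (10:Int)^(0 + (m.toNat+1)) := by simpa using lt_pow_toNat m h0
  have h1 : pvSeqLen m = 1 + pvS 0 (m.toNat+1) m := by
    unfold pvSeqLen
    have := seqAux_closed (m.toNat+1) (m.toNat+1) 0 1 m hbig le_rfl
    simpa using this
  by_cases h : c ≤ m.toNat+1
  · rw [h1, pvS_stable c (m.toNat+1) 0 m h (by simpa using hm)]
  · rw [h1, pvS_stable (m.toNat+1) c 0 m (by omega) hbig]

theorem pvS_step : ∀ (c j e : Nat) (m : Int), (10:Int)^e ≤ m → m < (10:Int)^(e+1) →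
    pvS j c m = pvS j c (m-1) + ((min (j+c) (e+1) : Nat) : Int) - ((min j (e+1) : Nat) : Int) := by
  intro c
  induction c with
  | zero => intro j e m _ _; simp [pvS]
  | succ c ih =>
    intro j e m h1 h2
    have hT : (if (10:Int)^j ≤ m then m - (10:Int)^j + 1 else 0)
        = (if (10:Int)^j ≤ m - 1 then m - 1 - (10:Int)^j + 1 else 0)
          + (if j ≤ e then (1:Int) else 0) := by
      by_cases hj : j ≤ e
      · have hle : (10:Int)^j ≤ m :=
          le_trans (pow_le_pow_right₀ (by norm_num) hj) h1
        by_cases hb : (10:Int)^j ≤ m - 1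
        · simp only [if_pos hle, if_pos hb, if_pos hj]; ring
        · simp only [if_pos hle, if_neg hb, if_pos hj]; omega
      · have hj' : e + 1 ≤ j := by omega
        have hgt : m < (10:Int)^j :=
          lt_of_lt_of_le h2 (pow_le_pow_right₀ (by norm_num) hj')
        have hA : ¬ ((10:Int)^j ≤ m) := not_le.mpr hgt
        have hB : ¬ ((10:Int)^j ≤ m - 1) := by omega
        simp [hA, hB, hj]
    simp only [pvS]
    rw [hT, ih (j+1) e m h1 h2]
    split_ifs <;> omega

theorem seqLen_step (e : Nat) (m : Int) (h1 : (10:Int)^e ≤ m) (h2 : m < (10:Int)^(e+1)) :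
    pvSeqLen m = pvSeqLen (m-1) + ((e:Int)+1) := by
  have hb : (1:Int) ≤ (10:Int)^e := one_le_pow₀ (by norm_num)
  rw [seqLen_closed (e+1) m (by omega) h2,
      seqLen_closed (e+1) (m-1) (by omega) (by omega)]
  have := pvS_step (e+1) 0 e m h1 h2
  simp only [Nat.zero_add, Nat.min_self, Nat.zero_min] at this
  omega

theorem exists_block (m : Int) (hm : 1 ≤ m) :
    ∃ e : Nat, (10:Int)^e ≤ m ∧ m < (10:Int)^(e+1) := by
  have hP : ∃ d : Nat, m < (10:Int)^d := ⟨m.toNat + 1, lt_pow_toNat m (by omega)⟩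
  classical
  have hd := Nat.find_spec hP
  have hd0 : Nat.find hP ≠ 0 := by
    intro h; rw [h] at hd; simp at hd; omega
  refine ⟨Nat.find hP - 1, ?_, ?_⟩
  · have := Nat.find_min hP (m := Nat.find hP - 1) (by omega)
    omega
  · rw [show Nat.find hP - 1 + 1 = Nat.find hP from by omega]; exact hd

theorem seqLen_zero : pvSeqLen 0 = 1 := by decide

theorem seqLen_succ (m : Int) (hm : 1 ≤ m) : pvSeqLen (m-1) + 1 ≤ pvSeqLen m := by
  obtain ⟨e, h1, h2⟩ := exists_block m hm
  rw [seqLen_step e m h1 h2]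
  have : (0:Int) ≤ (e:Int) := Int.natCast_nonneg e
  omega

theorem seqLen_mono : ∀ (k : Nat) (a b : Int), 0 ≤ a → a ≤ b → (b - a).toNat = k →
    pvSeqLen a ≤ pvSeqLen b := by
  intro k
  induction k with
  | zero =>
    intro a b _ h hk
    have hab : a = b := by omega
    exact le_of_eq (congrArg pvSeqLen hab)
  | succ k ih =>
    intro a b h0 h hk
    have hb1 : 1 ≤ b := by omega
    have := seqLen_succ b hb1
    have := ih a (b-1) h0 (by omega) (by omega)
    omega

theorem seqLen_lb : ∀ (k : Nat) (m : Int), 0 ≤ m → m.toNat = k → m + 1 ≤ pvSeqLen m := by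
  intro k
  induction k with
  | zero =>
    intro m h0 hk
    have : m = 0 := by omega
    rw [this, seqLen_zero]; omega
  | succ k ih =>
    intro m h0 hk
    have hm1 : 1 ≤ m := by omega
    have h1 := seqLen_succ m hm1
    have h2 := ih (m-1) (by omega) (by omega)
    omega

theorem seqLen_lin : ∀ (k : Nat) (e : Nat) (q : Int), q.toNat = k → 0 ≤ q →
    q ≤ 9*(10:Int)^e - 1 →
    pvSeqLen ((10:Int)^e + q) = pvSeqLen ((10:Int)^e - 1) + ((e:Int)+1) * (q+1) := by
  intro k
  induction k with
  | zero =>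
    intro e q hk h0 _
    have hq : q = 0 := by omega
    subst hq
    have hp : (0:Int) < (10:Int)^e := pow_pos (by norm_num) e
    have hps : (10:Int)^(e+1) = (10:Int)^e * 10 := pow_succ 10 e
    have := seqLen_step e ((10:Int)^e) le_rfl (by omega)
    rw [add_zero, this]; ring
  | succ k ih =>
    intro e q hk h0 h9
    have hq1 : 1 ≤ q := by omega
    have hp : (0:Int) < (10:Int)^e := pow_pos (by norm_num) e
    have hps : (10:Int)^(e+1) = (10:Int)^e * 10 := pow_succ 10 e
    have hstep := seqLen_step e ((10:Int)^e + q) (by omega) (by omega)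
    rw [hstep, show (10:Int)^e + q - 1 = (10:Int)^e + (q-1) from by ring,
        ih e (q-1) (by omega) (by omega) (by omega)]
    ring

-- L at the last position before a number inside block e
theorem seqLen_before (e : Nat) (q : Int) (h0 : 0 ≤ q) (h9 : q ≤ 9*(10:Int)^e - 1) :
    pvSeqLen ((10:Int)^e + q - 1) = pvSeqLen ((10:Int)^e - 1) + ((e:Int)+1) * q := by
  rcases eq_or_lt_of_le h0 with h | h
  · rw [← h]; norm_num
  · rw [show (10:Int)^e + q - 1 = (10:Int)^e + (q-1) from by ring,
        seqLen_lin (q-1).toNat e (q-1) rfl (by omega) (by omega)]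
    ring

-- A's loop, characterized by the sequence-length function L = pvSeqLen:
-- from state (n', block e) with N = n' + L(10^e - 1) - 1, it returns the digit of the
-- unique number m whose digits occupy positions [L(m-1), L(m)) around N.
theorem loopA_res : ∀ (fuel : Nat) (e : Nat) (n' N : Int), n'.toNat ≤ fuel → 1 ≤ n' →
    N = n' + pvSeqLen ((10:Int)^e - 1) - 1 →
    ∃ m : Int, 1 ≤ m ∧ pvSeqLen (m-1) ≤ N ∧ N < pvSeqLen m ∧
      pvLoopA fuel n' ((e:Int)+1) (9 * (10:Int)^e) ((10:Int)^e) =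
        PySem.Int.mod (PySem.Int.floordiv m ((10:Int) ^ ((pvSeqLen m - N - 1).toNat))) 10 := by
  intro fuel
  induction fuel with
  | zero => intro e n' N hf h1 _; omega
  | succ f ih =>
    intro e n' N hf h1 hN
    have hp : (0:Int) < (10:Int)^e := pow_pos (by norm_num) e
    have hps : (10:Int)^(e+1) = (10:Int)^e * 10 := pow_succ 10 e
    have he0 : (0:Int) ≤ (e:Int) := Int.natCast_nonneg e
    have he1 : (0:Int) < (e:Int) + 1 := by omega
    have hX9 : (9:Int) ≤ ((e:Int)+1) * (9 * (10:Int)^e) := by nlinarith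
    by_cases h : n' > ((e:Int)+1) * (9 * (10:Int)^e)
    · have e1 : ((e:Int)+1)+1 = (((e+1 : Nat)):Int)+1 := by push_cast; ring
      have e2 : 9*(10:Int)^e*10 = 9*(10:Int)^(e+1) := by rw [pow_succ]; ring
      have e3 : (10:Int)^e*10 = (10:Int)^(e+1) := (pow_succ 10 e).symm
      have hblk : pvSeqLen ((10:Int)^(e+1) - 1)
          = pvSeqLen ((10:Int)^e - 1) + ((e:Int)+1) * (9 * (10:Int)^e) := by
        have := seqLen_lin (9*(10:Int)^e - 1).toNat e (9*(10:Int)^e - 1) rfl (by omega) le_rfl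
        rw [show (10:Int)^e + (9*(10:Int)^e - 1) = (10:Int)^(e+1) - 1 from by rw [hps]; ring] at this
        rw [this]; ring
      simp only [pvLoopA, if_pos h]
      rw [e1, e2, e3]
      exact ih (e+1) (n' - ((e:Int)+1) * (9 * (10:Int)^e)) N
        (by omega) (by omega) (by rw [hblk]; omega)
    · -- exit: extract the digit arithmetic
      have hn9 : n' ≤ ((e:Int)+1) * (9 * (10:Int)^e) := not_lt.mp h
      have hq0 : 0 ≤ (n'-1) / ((e:Int)+1) := Int.ediv_nonneg (by omega) (by omega)
      have hqlt : (n'-1) / ((e:Int)+1) < 9 * (10:Int)^e := by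
        rw [Int.ediv_lt_iff_lt_mul he1, mul_comm]; omega
      have hb0 : 0 ≤ (n'-1) % ((e:Int)+1) := Int.emod_nonneg _ (by omega)
      have hblt : (n'-1) % ((e:Int)+1) < (e:Int)+1 := Int.emod_lt_of_pos _ he1
      have hdec : ((e:Int)+1) * ((n'-1) / ((e:Int)+1)) + (n'-1) % ((e:Int)+1) = n'-1 :=
        Int.ediv_add_emod (n'-1) ((e:Int)+1)
      have hLm1 : pvSeqLen ((10:Int)^e + (n'-1) / ((e:Int)+1) - 1)
          = pvSeqLen ((10:Int)^e - 1) + ((e:Int)+1) * ((n'-1) / ((e:Int)+1)) :=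
        seqLen_before e _ hq0 (by omega)
      have hLm : pvSeqLen ((10:Int)^e + (n'-1) / ((e:Int)+1))
          = pvSeqLen ((10:Int)^e - 1) + ((e:Int)+1) * ((n'-1) / ((e:Int)+1)) + ((e:Int)+1) := by
        rw [seqLen_lin ((n'-1) / ((e:Int)+1)).toNat e _ rfl hq0 (by omega)]; ring
      refine ⟨(10:Int)^e + (n'-1) / ((e:Int)+1), by omega, by rw [hLm1]; omega,
        by rw [hLm]; omega, ?_⟩
      simp only [pvLoopA, if_neg h]
      rw [PySem.Int.floordiv_eq_ediv_of_pos he1, PySem.Int.mod_eq_emod_of_pos he1]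
      rw [show (n'-1) / ((e:Int)+1) + (10:Int)^e = (10:Int)^e + (n'-1) / ((e:Int)+1) from by ring]
      have hexp : ((e:Int)+1) - 1 - (n'-1) % ((e:Int)+1)
          = pvSeqLen ((10:Int)^e + (n'-1) / ((e:Int)+1)) - N - 1 := by
        rw [hLm]; omega
      rw [hexp]

-- Source B's binary search: from an invariant window it returns the unique number whose
-- digits contain position n
theorem search_res : ∀ (fuel : Nat) (n lo hi : Int), (hi - lo).toNat ≤ fuel → 1 ≤ lo →
    lo ≤ hi → pvSeqLen (lo - 1) ≤ n → n < pvSeqLen hi →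
    1 ≤ pvSearch fuel n lo hi ∧ pvSeqLen (pvSearch fuel n lo hi - 1) ≤ n ∧
      n < pvSeqLen (pvSearch fuel n lo hi) := by
  intro fuel
  induction fuel with
  | zero =>
    intro n lo hi hf h1 hlh hA hB
    have : lo = hi := by omega
    subst this
    simpa [pvSearch] using ⟨h1, hA, hB⟩
  | succ f ih =>
    intro n lo hi hf h1 hlh hA hB
    by_cases hc : lo < hi
    · have hmid1 : lo ≤ PySem.Int.floordiv (lo + hi) 2 :=
        (PySem.Int.floordiv_two_mid_bounds hlh).1
      have hmid2 : PySem.Int.floordiv (lo + hi) 2 < hi := by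
        rw [PySem.Int.floordiv_lt_iff_lt_mul (by norm_num)]; omega
      by_cases hg : pvSeqLen (PySem.Int.floordiv (lo + hi) 2) > n
      · simp only [pvSearch, if_pos hc, if_pos hg]
        exact ih n lo (PySem.Int.floordiv (lo + hi) 2) (by omega) h1 hmid1 hA hg
      · simp only [pvSearch, if_pos hc, if_neg hg]
        refine ih n (PySem.Int.floordiv (lo + hi) 2 + 1) hi (by omega) (by omega)
          (by omega) ?_ hB
        rw [show PySem.Int.floordiv (lo + hi) 2 + 1 - 1 = PySem.Int.floordiv (lo + hi) 2 from by ring]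
        omega
    · have : lo = hi := by omega
      subst this
      simpa [pvSearch, hc] using ⟨h1, hA, hB⟩

-- positions [L(m-1), L(m)) determine m uniquely (L is monotone)
theorem block_uniq (N a b : Int) (ha1 : 1 ≤ a) (hb1 : 1 ≤ b)
    (ha : pvSeqLen (a-1) ≤ N) (ha' : N < pvSeqLen a)
    (hb : pvSeqLen (b-1) ≤ N) (hb' : N < pvSeqLen b) : a = b := by
  rcases lt_trichotomy a b with h | h | h
  · have := seqLen_mono (b - 1 - a).toNat a (b-1) (by omega) (by omega) rfl
    omega
  · exact h
  · have := seqLen_mono (a - 1 - b).toNat b (a-1) (by omega) (by omega) rfl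
    omega

-- ===== VERDICT (by name: the statement is the Claim_ definition above) =====
theorem digitAtIndex_spec : Claim_equal_digitAtIndex := by
  intro n _
  unfold Spec_digitAtIndex digitAtIndex digitAtIndex_alt
  by_cases h1 : n < 0
  · simp [h1]
  · by_cases h2 : n = 0
    · simp [h2]
    · simp only [if_neg h1, if_neg h2]
      have hn1 : 1 ≤ n := by omega
      have hL0 : pvSeqLen ((10:Int)^(0:Nat) - 1) = 1 := by norm_num [seqLen_zero]
      obtain ⟨m, hm1, hmle, hmlt, hA⟩ :=
        loopA_res n.toNat 0 n n le_rfl hn1 (by rw [hL0]; ring)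
      simp only [Nat.cast_zero, zero_add, pow_zero, mul_one] at hA
      have hLlo : pvSeqLen ((1:Int) - 1) ≤ n := by norm_num [seqLen_zero]; omega
      have hLhi : n < pvSeqLen n := by
        have := seqLen_lb n.toNat n (by omega) rfl
        omega
      obtain ⟨hr1, hrle, hrlt⟩ :=
        search_res n.toNat n 1 n (by omega) le_rfl hn1 hLlo hLhi
      have hrm : m = pvSearch n.toNat n 1 n :=
        block_uniq n m (pvSearch n.toNat n 1 n) hm1 hr1 hmle hmlt hrle hrlt
      rw [hA, hrm,
        show pvSeqLen (pvSearch n.toNat n 1 n)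
            - pvSeqLen (pvSearch n.toNat n 1 n - 1) - 1
            - (n - pvSeqLen (pvSearch n.toNat n 1 n - 1))
          = pvSeqLen (pvSearch n.toNat n 1 n) - n - 1 from by ring]
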